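-- pv_equiv track=rewrite | github.com/cheesepp/hcmus_archive | AM/Lab01/21120576.py | isZeroRow
-- ===== SOURCE A (Python) =====
-- def isZeroRow(arr, i, cols):
--     isZero = False
--     for j in range(cols):
--             if arr[i][j] == 0:
--                 isZero = True
--                 continue
--             else:
--                 isZero = False
--                 break
--     return isZero
-- ===== SOURCE B (Python) =====
-- def isZeroRow(arr, i, cols):
--     if cols <= 0:
--         return False
--     return set(arr[i][:cols]) == {0}
-- ===== Notes on version B (the rewrite author's own statement) =====
-- stated objective: idiomatic
-- what changed: B replaces A's early-breaking flag loop by slicing the first cols elements of the row (Python slicing clamps) and comparing their set structurally to {0}.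
import Mathlib
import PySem

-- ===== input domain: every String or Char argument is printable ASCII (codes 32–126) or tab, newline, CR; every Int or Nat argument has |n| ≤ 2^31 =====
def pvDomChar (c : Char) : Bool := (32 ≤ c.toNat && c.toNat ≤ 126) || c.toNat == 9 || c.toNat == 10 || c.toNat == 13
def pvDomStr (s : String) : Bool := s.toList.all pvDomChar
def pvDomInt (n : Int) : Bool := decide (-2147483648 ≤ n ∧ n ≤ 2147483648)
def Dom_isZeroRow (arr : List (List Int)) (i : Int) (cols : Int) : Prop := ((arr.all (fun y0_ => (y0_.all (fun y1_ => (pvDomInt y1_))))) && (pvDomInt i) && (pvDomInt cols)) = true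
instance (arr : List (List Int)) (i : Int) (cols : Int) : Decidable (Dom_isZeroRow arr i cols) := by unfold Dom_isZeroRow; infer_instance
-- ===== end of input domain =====

-- B replaces A's early-breaking flag loop by slicing the first cols elements of the row
-- (Python slicing clamps) and comparing their set structurally to {0} (idiomatic; no speed claim).

-- ===== PORT A =====
-- the for-j loop of A: flag isZero, 'continue' on zero, 'break' (returning the cleared flag) on nonzero
def isZeroRowGo (row : List Int) (j : Nat) (fuel : Nat) (isZero : Bool) : Bool :=
  match fuel with
  | 0 => isZero
  | f + 1 =>
    match PySem.List.pyGet? row (j : Int) with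
    | none => false            -- Python raises IndexError here; excluded by Pre_isZeroRow
    | some v => if v == 0 then isZeroRowGo row (j + 1) f true else false

def isZeroRow (arr : List (List Int)) (i : Int) (cols : Int) : Bool :=
  if cols ≤ 0 then false       -- range(cols) is empty: the loop body (and arr[i]) is never evaluated
  else
    match PySem.List.pyGet? arr i with
    | none => false            -- Python raises IndexError here; excluded by Pre_isZeroRow
    | some row => isZeroRowGo row 0 cols.toNat false

-- ===== PORT B =====
-- if cols <= 0: return False;  return set(arr[i][:cols]) == {0}
def isZeroRow_alt (arr : List (List Int)) (i : Int) (cols : Int) : Bool :=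
  if cols ≤ 0 then false
  else
    match PySem.List.pyGet? arr i with
    | none => false            -- Python raises IndexError here; excluded by Pre_isZeroRow
    | some row =>
      PySem.Set.equal (PySem.Set.ofList (PySem.List.slice row none (some cols)))
        (PySem.Set.ofList [0])

-- ===== PRECONDITION & SPEC =====
-- Pre_ excludes exactly the inputs on which Python A raises IndexError: cols > 0 with an invalid
-- row index i, or cols > 0 with a valid all-zero row shorter than cols (the loop never breaks and
-- runs off the end of the row).  On every input where A returns a value, Pre_ holds.
def Pre_isZeroRow (arr : List (List Int)) (i : Int) (cols : Int) : Prop :=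
  cols ≤ 0 ∨
    ((PySem.List.pyGet? arr i).isSome = true ∧
      (cols ≤ (((PySem.List.pyGet? arr i).getD []).length : Int) ∨
        ¬ (((PySem.List.pyGet? arr i).getD []).all (fun v => v == 0)) = true))
instance (arr : List (List Int)) (i : Int) (cols : Int) : Decidable (Pre_isZeroRow arr i cols) := by
  unfold Pre_isZeroRow; infer_instance

def pvWitness_isZeroRow : List (List Int) × Int × Int := ([[0, 0], [0, 1]], 0, 2)

def Spec_isZeroRow (arr : List (List Int)) (i : Int) (cols : Int) (out : Bool) : Prop := out = isZeroRow_alt arr i cols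
instance (arr : List (List Int)) (i : Int) (cols : Int) (out : Bool) : Decidable (Spec_isZeroRow arr i cols out) := by unfold Spec_isZeroRow; infer_instance

-- ===== CLAIM (what is proved, stated in full; the proofs are below) =====
def Claim_equal_isZeroRow : Prop := ∀ (arr : List (List Int)) (i : Int) (cols : Int), Dom_isZeroRow arr i cols → Pre_isZeroRow arr i cols → Spec_isZeroRow arr i cols (isZeroRow arr i cols)

-- ===== LEMMAS AND PROOFS =====

-- if all scanned entries are zero, the loop keeps the flag true to the end
theorem isZeroRowGo_all_zero (row : List Int) (j f : Nat)
    (h : ∀ k, k < f → PySem.List.pyGet? row ((j + k : Nat) : Int) = some 0) :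
    isZeroRowGo row j f true = true := by
  induction f generalizing j with
  | zero => rfl
  | succ f ih =>
    have h0 := h 0 (Nat.succ_pos f)
    simp only [Nat.add_zero] at h0
    simp only [isZeroRowGo, h0]
    simp only [beq_self_eq_true, if_true]
    exact ih (j + 1) (fun k hk => by
      have := h (k + 1) (Nat.succ_lt_succ hk)
      simpa [Nat.add_assoc, Nat.add_comm 1 k] using this)

-- if some scanned entry is nonzero (and earlier ones are defined zeros), the loop returns false
theorem isZeroRowGo_nonzero (row : List Int) (j f : Nat) (b : Bool) (k : Nat)
    (hk : k < f) (v : Int)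
    (hv : PySem.List.pyGet? row ((j + k : Nat) : Int) = some v) (hvne : v ≠ 0)
    (hz : ∀ m, m < k → PySem.List.pyGet? row ((j + m : Nat) : Int) = some 0) :
    isZeroRowGo row j f b = false := by
  induction f generalizing j b k with
  | zero => exact absurd hk (Nat.not_lt_zero k)
  | succ f ih =>
    cases k with
    | zero =>
      simp only [Nat.add_zero] at hv
      simp only [isZeroRowGo, hv]
      simp [hvne]
    | succ k =>
      have h0 := hz 0 (Nat.succ_pos k)
      simp only [Nat.add_zero] at h0
      simp only [isZeroRowGo, h0]
      simp only [beq_self_eq_true, if_true]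
      exact ih (j + 1) true k (Nat.lt_of_succ_lt_succ hk)
        (by simpa [Nat.add_assoc, Nat.add_comm 1 k] using hv)
        (fun m hm => by
          have := hz (m + 1) (Nat.succ_lt_succ hm)
          simpa [Nat.add_assoc, Nat.add_comm 1 m] using this)

-- B's set comparison on a plain list: set(t) == {0} iff t is nonempty and all-zero
theorem set_equal_zero_iff (t : List Int) :
    PySem.Set.equal (PySem.Set.ofList t) (PySem.Set.ofList [0]) = true ↔
      t ≠ [] ∧ ∀ x ∈ t, x = 0 := by
  rw [PySem.Set.equal_iff]
  constructor
  · intro h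
    constructor
    · intro ht
      have := (h 0).mpr (by rw [PySem.Set.mem_ofList]; simp)
      rw [PySem.Set.mem_ofList, ht] at this
      simp at this
    · intro x hx
      have := (h x).mp (by rw [PySem.Set.mem_ofList]; exact hx)
      rw [PySem.Set.mem_ofList] at this
      simpa using this
  · rintro ⟨hne, hall⟩ x
    rw [PySem.Set.mem_ofList, PySem.Set.mem_ofList]
    constructor
    · intro hx; simp [hall x hx]
    · intro hx
      simp only [List.mem_singleton] at hx
      subst hx
      obtain ⟨y, hy⟩ := List.exists_mem_of_ne_nil t hne
      have := hall y hy
      subst this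
      exact hy

theorem isZeroRow_spec' (arr : List (List Int)) (i : Int) (cols : Int)
    (hpre : Pre_isZeroRow arr i cols) :
    isZeroRow arr i cols = isZeroRow_alt arr i cols := by
  by_cases hc : cols ≤ 0
  · rw [isZeroRow, if_pos hc, isZeroRow_alt, if_pos hc]
  · rcases hpre with h | ⟨hsome, hdisj⟩
    · omega
    obtain ⟨row, hrow⟩ := Option.isSome_iff_exists.mp hsome
    rw [hrow] at hdisj
    simp only [Option.getD_some] at hdisj
    have hcpos : 0 < cols := by omega
    have hslice : PySem.List.slice row none (some cols) = row.take cols.toNat :=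
      PySem.List.slice_to row (by omega)
    have hgetN : ∀ k : Nat, k < row.length →
        PySem.List.pyGet? row (k : Int) = some (row.getD k 0) := by
      intro k hk'
      rw [PySem.List.pyGet?_natCast, List.getElem?_eq_getElem hk',
        ← List.getD_eq_getElem row 0 hk']
    rw [isZeroRow, if_neg hc, isZeroRow_alt, if_neg hc, hrow]
    show isZeroRowGo row 0 cols.toNat false =
      PySem.Set.equal (PySem.Set.ofList (PySem.List.slice row none (some cols))) (PySem.Set.ofList [0])
    rw [hslice]
    by_cases hall : ∀ x ∈ row.take cols.toNat, x = 0
    · -- all scanned entries zero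
      have hlen : cols ≤ (row.length : Int) := by
        rcases hdisj with h | h
        · exact h
        · by_contra hcl
          have heq : row.take cols.toNat = row := by
            apply List.take_of_length_le; omega
          apply h; simp only [List.all_eq_true]
          intro v hv
          rw [heq] at hall
          simp [hall v hv]
      have htake_len : (row.take cols.toNat).length = cols.toNat := by
        rw [List.length_take]; omega
      have hA : isZeroRowGo row 0 cols.toNat false = true := by
        have hget0 : ∀ k : Nat, k < cols.toNat → PySem.List.pyGet? row (k : Int) = some 0 := by
          intro k hk
          have hk' : k < row.length := by omega
          rw [hgetN k hk']
          have : row.getD k 0 ∈ row.take cols.toNat := by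
            rw [List.getD_eq_getElem row 0 hk']
            apply List.mem_take_iff_getElem.mpr
            exact ⟨k, by omega, by simp⟩
          rw [hall _ this]
        have h1 : cols.toNat = (cols.toNat - 1) + 1 := by omega
        rw [h1]
        simp only [isZeroRowGo]
        rw [show ((0 : Nat) : Int) = ((0 : Nat) : Int) from rfl, hget0 0 (by omega)]
        simp only [beq_self_eq_true, if_true]
        apply isZeroRowGo_all_zero
        intro k hk
        exact hget0 (1 + k) (by omega)
      rw [hA]
      symm
      rw [set_equal_zero_iff]
      exact ⟨by simp [← List.length_pos_iff]; omega, hall⟩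
    · -- some scanned entry nonzero: there is a first one, within the row
      simp only [not_forall, exists_prop] at hall
      have hex : ∃ k : Nat, k < (row.take cols.toNat).length ∧ (row.take cols.toNat).getD k 0 ≠ 0 := by
        obtain ⟨x, hx, hxne⟩ := hall
        obtain ⟨k, hk, hkx⟩ := List.getElem_of_mem hx
        exact ⟨k, hk, by rw [List.getD_eq_getElem _ 0 hk, hkx]; exact hxne⟩
      obtain ⟨hk, hkne⟩ := Nat.find_spec hex
      have hz : ∀ m, m < Nat.find hex → (row.take cols.toNat).getD m 0 = 0 := by
        intro m hm
        by_contra hmz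
        exact Nat.find_min hex hm ⟨by omega, hmz⟩
      have htl : (row.take cols.toNat).length ≤ row.length := by
        simp [List.length_take]
      have htc : (row.take cols.toNat).length ≤ cols.toNat := by
        simp [List.length_take]
      have hkrow : Nat.find hex < row.length := by omega
      have hgetTake : ∀ m : Nat, m < (row.take cols.toNat).length →
          (row.take cols.toNat).getD m 0 = row.getD m 0 := by
        intro m hm
        rw [List.getD_eq_getElem _ 0 hm, List.getD_eq_getElem row 0 (by omega)]
        simp
      have hA : isZeroRowGo row 0 cols.toNat false = false := by
        apply isZeroRowGo_nonzero row 0 cols.toNat false (Nat.find hex)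
          (by omega) (row.getD (Nat.find hex) 0)
        · have he : ((0 + Nat.find hex : Nat) : Int) = ((Nat.find hex : Nat) : Int) := by
            push_cast; ring
          rw [he]; exact hgetN _ hkrow
        · rw [← hgetTake _ hk]; exact hkne
        · intro m hm
          have hm' : m < (row.take cols.toNat).length := by omega
          have he : ((0 + m : Nat) : Int) = ((m : Nat) : Int) := by push_cast; ring
          rw [he, hgetN m (by omega), ← hgetTake m hm', hz m hm]
      rw [hA]
      symm
      rw [Bool.eq_false_iff]
      intro habs
      rw [set_equal_zero_iff] at habs
      apply hkne
      rw [List.getD_eq_getElem _ 0 hk]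
      exact habs.2 _ (List.getElem_mem hk)

-- ===== VERDICT (by name: the statement is the Claim_ definition above) =====
theorem isZeroRow_spec : Claim_equal_isZeroRow := by
  intro arr i cols _ hpre
  exact isZeroRow_spec' arr i cols hpre
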